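-- pv_equiv track=rewrite | github.com/siwexman/w67271_jezyki_i_paradygmaty_programowania | Lab1/zadanie3.py | procedural_scheduling
-- ===== SOURCE A (Python) =====
-- def procedural_scheduling(tasks):
--     tasks.sort(key=lambda x: x[0])
--
--     total_wait_time = 0
--     total_reward = 0
--     current_time = 0
--
--     for time, reward in tasks:
--         current_time += time
--         total_wait_time += current_time
--         total_reward += reward
--
--     return tasks, total_wait_time, total_reward
-- ===== SOURCE B (Python) =====
-- def procedural_scheduling(tasks):
--     tasks.sort(key=lambda x: x[0])
--     n = len(tasks)
--     total_reward = sum(r for _, r in tasks)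
--     total_wait_time = sum(t * (n - i) for i, (t, _) in enumerate(tasks))
--     return tasks, total_wait_time, total_reward
-- ===== Notes on version B (the rewrite author's own statement) =====
-- stated objective: alternative
-- what changed: Replaces the threaded running-clock accumulator (current_time/total_wait_time carried through one loop) with two independent closed sums after the in-place sort: total_reward = sum of rewards, and total_wait_time as a position-weighted sum t*(n-i) over enumerate, using the identity that task i's service time is counted in its own and every later completion time.
import Mathlib
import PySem

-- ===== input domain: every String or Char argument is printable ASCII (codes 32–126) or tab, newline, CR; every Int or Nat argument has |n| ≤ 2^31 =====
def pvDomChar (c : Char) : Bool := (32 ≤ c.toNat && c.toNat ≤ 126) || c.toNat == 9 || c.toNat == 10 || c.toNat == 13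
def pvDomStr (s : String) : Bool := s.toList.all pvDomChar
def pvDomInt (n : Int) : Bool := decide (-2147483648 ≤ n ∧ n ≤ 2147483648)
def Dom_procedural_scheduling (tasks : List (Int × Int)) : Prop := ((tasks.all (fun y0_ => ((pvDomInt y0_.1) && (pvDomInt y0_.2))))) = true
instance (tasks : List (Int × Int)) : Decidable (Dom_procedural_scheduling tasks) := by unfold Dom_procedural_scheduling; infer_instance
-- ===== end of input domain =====

-- B replaces A's threaded running-clock accumulation with two independent closed sums
-- (reward sum, and a position-weighted wait sum t*(n-i) over enumerate) after the same
-- in-place sort; both A and B sort the argument list in place (same side effect), the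
-- equivalence proved here is about the return value.

-- ===== PORT A =====
def procedural_scheduling (tasks : List (Int × Int)) : (List (Int × Int)) × Int × Int :=
  let s := PySem.List.sorted tasks (fun x => x.1) false
  -- state (current_time, total_wait_time, total_reward), updated exactly as A's loop body
  let st := s.foldl (fun (st : Int × Int × Int) tr =>
      let current_time := st.1 + tr.1
      (current_time, st.2.1 + current_time, st.2.2 + tr.2)) (0, 0, 0)
  (s, st.2.1, st.2.2)

-- ===== PORT B =====
def procedural_scheduling_alt (tasks : List (Int × Int)) : (List (Int × Int)) × Int × Int :=
  let s := PySem.List.sorted tasks (fun x => x.1) false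
  let n : Int := s.length
  let total_reward := s.foldl (fun acc tr => acc + tr.2) 0
  let total_wait_time := (PySem.List.enumerate s).foldl (fun acc p => acc + p.2.1 * (n - p.1)) 0
  (s, total_wait_time, total_reward)

-- ===== PRECONDITION & SPEC =====
def Spec_procedural_scheduling (tasks : List (Int × Int)) (out : (List (Int × Int)) × Int × Int) : Prop := out = procedural_scheduling_alt tasks
instance (tasks : List (Int × Int)) (out : (List (Int × Int)) × Int × Int) : Decidable (Spec_procedural_scheduling tasks out) := by unfold Spec_procedural_scheduling; infer_instance

-- ===== CLAIM (what is proved, stated in full; the proofs are below) =====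
def Claim_equal_procedural_scheduling : Prop := ∀ (tasks : List (Int × Int)), Dom_procedural_scheduling tasks → Spec_procedural_scheduling tasks (procedural_scheduling tasks)

-- ===== LEMMAS AND PROOFS =====

-- wait-time specification: Wspec l = Σ t_k * (number of tasks from position k on)
def Wspec : List (Int × Int) → Int
  | [] => 0
  | (t, _) :: rest => t * ((rest.length : Int) + 1) + Wspec rest

def Rspec : List (Int × Int) → Int
  | [] => 0
  | (_, r) :: rest => r + Rspec rest

def Sspec : List (Int × Int) → Int
  | [] => 0
  | (t, _) :: rest => t + Sspec rest

theorem foldA_eq (l : List (Int × Int)) : ∀ (c w r : Int),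
    l.foldl (fun (st : Int × Int × Int) tr =>
      let current_time := st.1 + tr.1
      (current_time, st.2.1 + current_time, st.2.2 + tr.2)) (c, w, r)
    = (c + Sspec l, w + (l.length : Int) * c + Wspec l, r + Rspec l) := by
  induction l with
  | nil => intro c w r; simp [Sspec, Wspec, Rspec]
  | cons hd tl ih =>
    intro c w r
    obtain ⟨t, rw⟩ := hd
    simp only [List.foldl_cons, ih, Sspec, Wspec, Rspec, List.length_cons]
    simp only [Prod.mk.injEq]
    refine ⟨by ring, by push_cast; ring, by ring⟩

theorem foldR_eq (l : List (Int × Int)) : ∀ (acc : Int),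
    l.foldl (fun acc tr => acc + tr.2) acc = acc + Rspec l := by
  induction l with
  | nil => intro acc; simp [Rspec]
  | cons hd tl ih =>
    intro acc
    obtain ⟨t, rw⟩ := hd
    simp only [List.foldl_cons, ih, Rspec]
    ring

theorem foldW_eq (l : List (Int × Int)) : ∀ (s n acc : Int), n - s = l.length →
    (PySem.List.enumerate l s).foldl (fun acc p => acc + p.2.1 * (n - p.1)) acc
    = acc + Wspec l := by
  induction l with
  | nil => intro s n acc _; simp [PySem.List.enumerate_nil, Wspec]
  | cons hd tl ih =>
    intro s n acc h
    obtain ⟨t, rw⟩ := hd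
    simp only [List.length_cons] at h
    rw [PySem.List.enumerate_cons]
    simp only [List.foldl_cons, Wspec]
    rw [ih (s + 1) n _ (by push_cast at h ⊢; omega)]
    have : n - s = (tl.length : Int) + 1 := by push_cast at h ⊢; omega
    rw [this]; ring_nf

-- ===== VERDICT (by name: the statement is the Claim_ definition above) =====
theorem procedural_scheduling_spec : Claim_equal_procedural_scheduling := by
  intro tasks _
  unfold Spec_procedural_scheduling procedural_scheduling procedural_scheduling_alt
  set s := PySem.List.sorted tasks (fun x => x.1) false with hs
  simp only [foldA_eq, foldR_eq, foldW_eq s 0 (s.length : Int) 0 (by simp)]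
  simp
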